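-- pv_equiv track=rewrite | github.com/MDymek28/system-wczesnego-wykrywania-opoznien-lotniczych | 1_rozpakowywanie_danych.py | compute_fieldnames_all
-- ===== SOURCE A (Python) =====
-- from typing import List, Dict, Any
--
-- def compute_fieldnames_all(records: List[Dict[str, Any]]) -> List[str]:
--     all_keys = set()
--     for rec in records:
--         all_keys.update(rec.keys())
--
--     preferred_order = []
--     if "time" in all_keys:
--         preferred_order.append("time")
--     if "utc_date" in all_keys:
--         preferred_order.append("utc_date")
--     if "utc_time" in all_keys:
--         preferred_order.append("utc_time")
--
--     remaining = sorted(k for k in all_keys if k not in preferred_order)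
--     return preferred_order + remaining
-- ===== SOURCE B (Python) =====
-- from typing import List, Dict, Any
--
-- def compute_fieldnames_all(records: List[Dict[str, Any]]) -> List[str]:
--     all_keys = set()
--     for rec in records:
--         all_keys.update(rec.keys())
--     rank = {"time": 0, "utc_date": 1, "utc_time": 2}
--     return sorted(all_keys, key=lambda k: (rank.get(k, 3), k))
-- ===== Notes on version B (the rewrite author's own statement) =====
-- stated objective: simpler
-- what changed: Replaces the explicit three-if preferred-list construction plus separate filter-sort-concatenate with a single sort of all distinct keys under a composite key (rank from a dict with fallback 3, then the key itself).
import Mathlib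
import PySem

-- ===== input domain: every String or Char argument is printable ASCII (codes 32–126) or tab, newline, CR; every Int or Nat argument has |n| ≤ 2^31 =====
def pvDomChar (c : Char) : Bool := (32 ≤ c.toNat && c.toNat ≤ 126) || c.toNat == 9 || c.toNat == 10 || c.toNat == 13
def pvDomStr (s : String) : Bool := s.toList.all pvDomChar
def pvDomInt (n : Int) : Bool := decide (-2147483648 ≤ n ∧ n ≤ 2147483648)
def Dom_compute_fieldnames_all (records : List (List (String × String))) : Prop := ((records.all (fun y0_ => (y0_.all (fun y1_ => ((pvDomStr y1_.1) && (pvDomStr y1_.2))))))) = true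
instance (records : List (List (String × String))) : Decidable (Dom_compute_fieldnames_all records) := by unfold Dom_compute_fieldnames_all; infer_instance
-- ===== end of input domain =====

-- B replaces A's explicit preferred-list construction + filter-sort-concatenate with one
-- composite-key sort (rank from a dict, then the key); objective: simpler decomposition, same cost.

-- ===== PORT A =====
def compute_fieldnames_all (records : List (List (String × String))) : List String :=
  let all_keys : PySem.Set String :=
    records.foldl (fun s rec => PySem.Set.update s (PySem.Dict.keys (PySem.Dict.mk rec))) PySem.Set.empty
  let preferred_order : List String := []
  let preferred_order :=
    if PySem.Set.contains all_keys "time" then preferred_order ++ ["time"] else preferred_order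
  let preferred_order :=
    if PySem.Set.contains all_keys "utc_date" then preferred_order ++ ["utc_date"] else preferred_order
  let preferred_order :=
    if PySem.Set.contains all_keys "utc_time" then preferred_order ++ ["utc_time"] else preferred_order
  -- 'sorted(k for k in all_keys if k not in preferred_order)': order-independent consumption of the set
  let remaining :=
    PySem.List.sorted (all_keys.filter (fun k => !(preferred_order.contains k))) (fun k => k) false
  preferred_order ++ remaining

-- ===== PORT B =====
def pvRankDict : PySem.Dict String Int := PySem.Dict.mk [("time", 0), ("utc_date", 1), ("utc_time", 2)]

def compute_fieldnames_all_alt (records : List (List (String × String))) : List String :=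
  let all_keys : PySem.Set String :=
    records.foldl (fun s rec => PySem.Set.update s (PySem.Dict.keys (PySem.Dict.mk rec))) PySem.Set.empty
  -- sorted(all_keys, key=lambda k: (rank.get(k, 3), k)): tuple key, injective on strings
  PySem.List.sorted2 all_keys (fun k => PySem.Dict.getD pvRankDict k 3) (fun k => k) false

-- ===== PRECONDITION & SPEC =====
def Spec_compute_fieldnames_all (records : List (List (String × String))) (out : List String) : Prop := out = compute_fieldnames_all_alt records
instance (records : List (List (String × String))) (out : List String) : Decidable (Spec_compute_fieldnames_all records out) := by unfold Spec_compute_fieldnames_all; infer_instance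

-- ===== CLAIM (what is proved, stated in full; the proofs are below) =====
def Claim_equal_compute_fieldnames_all : Prop := ∀ (records : List (List (String × String))), Dom_compute_fieldnames_all records → Spec_compute_fieldnames_all records (compute_fieldnames_all records)

-- ===== LEMMAS AND PROOFS =====

-- the composite sort key of B, as one Lex value
def pvKey (k : String) : Lex (Int × String) := toLex (PySem.Dict.getD pvRankDict k 3, k)

-- the preferred prefix A builds (same let-chain as in the port), as a function of the key set
def pvPref (S : List String) : List String :=
  let p0 : List String := []
  let p1 := if PySem.Set.contains S "time" then p0 ++ ["time"] else p0
  let p2 := if PySem.Set.contains S "utc_date" then p1 ++ ["utc_date"] else p1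
  if PySem.Set.contains S "utc_time" then p2 ++ ["utc_time"] else p2

theorem sorted2_eq_sorted_lex (xs : List String) (k1 : String → Int) (k2 : String → String) :
    PySem.List.sorted2 xs k1 k2 false = PySem.List.sorted xs (fun x => toLex (k1 x, k2 x)) false := by
  unfold PySem.List.sorted2 PySem.List.sorted
  have h : (fun a b => decide (k1 a < k1 b) || (!decide (k1 b < k1 a) && decide (k2 a < k2 b)))
      = (fun a b => decide ((toLex (k1 a, k2 a) : Lex (Int × String)) < toLex (k1 b, k2 b))) := by
    funext a b
    rcases lt_trichotomy (k1 a) (k1 b) with h1 | h1 | h1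
    · simp [Prod.Lex.lt_iff, h1, asymm h1]
    · simp [Prod.Lex.lt_iff, h1]
    · simp [Prod.Lex.lt_iff, h1, asymm h1, h1.ne']
  simp only [Bool.false_eq_true, if_false]
  rw [h]

theorem nodup_add {s : PySem.Set String} (h : s.Nodup) (x : String) : (PySem.Set.add s x).Nodup := by
  unfold PySem.Set.add
  split
  · exact h
  · rename_i hc
    have hx : x ∉ s := by simpa using hc
    refine List.Nodup.append h (List.nodup_singleton x) ?_
    intro a ha hb
    rw [List.mem_singleton] at hb
    exact hx (hb ▸ ha)

theorem nodup_foldl_update (records : List (List (String × String))) :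
    ∀ (s : PySem.Set String), s.Nodup →
      (records.foldl (fun s rec => PySem.Set.update s (PySem.Dict.keys (PySem.Dict.mk rec))) s).Nodup := by
  induction records with
  | nil => intro s hs; exact hs
  | cons r rs ih =>
      intro s hs
      refine ih _ ?_
      have hup : ∀ (ks : List String) (s : PySem.Set String), s.Nodup →
          (List.foldl PySem.Set.add s ks).Nodup := by
        intro ks
        induction ks with
        | nil => intro s hs; exact hs
        | cons k ks ihk => intro s hs; exact ihk _ (nodup_add hs k)
      exact hup _ _ hs

theorem rank_time : PySem.Dict.getD pvRankDict "time" 3 = 0 := by decide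
theorem rank_utc_date : PySem.Dict.getD pvRankDict "utc_date" 3 = 1 := by decide
theorem rank_utc_time : PySem.Dict.getD pvRankDict "utc_time" 3 = 2 := by decide

theorem rank_other {k : String} (h1 : k ≠ "time") (h2 : k ≠ "utc_date") (h3 : k ≠ "utc_time") :
    PySem.Dict.getD pvRankDict k 3 = 3 := by
  have e1 : ("time" == k) = false := by simpa using Ne.symm h1
  have e2 : ("utc_date" == k) = false := by simpa using Ne.symm h2
  have e3 : ("utc_time" == k) = false := by simpa using Ne.symm h3
  simp [pvRankDict, PySem.Dict.getD, PySem.Dict.get?, List.find?, e1, e2, e3]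

-- membership in the preferred prefix, characterised
theorem mem_pref_iff {S : List String} {a : String} :
    a ∈ pvPref S ↔ (a ∈ S ∧ (a = "time" ∨ a = "utc_date" ∨ a = "utc_time")) := by
  simp only [pvPref, PySem.Set.contains, List.contains_eq_mem]
  split_ifs with h1 h2 h3 <;> simp_all <;> aesop

theorem rank_le_two_of_mem_pref {S : List String} {a : String} (ha : a ∈ pvPref S) :
    PySem.Dict.getD pvRankDict a 3 ≤ 2 := by
  rcases (mem_pref_iff.mp ha).2 with rfl | rfl | rfl <;>
    simp [rank_time, rank_utc_date, rank_utc_time]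

theorem mem_pref_sub {S : List String} {a : String} (ha : a ∈ pvPref S) : a ∈ S :=
  (mem_pref_iff.mp ha).1

theorem pref_nodup (S : List String) : (pvPref S).Nodup := by
  simp only [pvPref]
  split_ifs <;> decide

-- the three preferred names, if present in S, land in pvPref S
theorem pref_complete {S : List String} {t : String}
    (ht : t = "time" ∨ t = "utc_date" ∨ t = "utc_time") (hS : t ∈ S) : t ∈ pvPref S :=
  mem_pref_iff.mpr ⟨hS, ht⟩

-- a key of S that is not in pvPref S has rank 3
theorem rank_three_of_filter {S : List String} {b : String} (hbS : b ∈ S) (hb : b ∉ pvPref S) :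
    PySem.Dict.getD pvRankDict b 3 = 3 := by
  apply rank_other <;> rintro rfl <;> exact hb (pref_complete (by simp) hbS)

-- pairwise strict key-increase inside the preferred prefix
theorem pref_pairwise (S : List String) :
    (pvPref S).Pairwise (fun a b => pvKey a < pvKey b) := by
  simp only [pvPref]
  have h01 : pvKey "time" < pvKey "utc_date" := by
    simp [pvKey, Prod.Lex.lt_iff, rank_time, rank_utc_date]
  have h02 : pvKey "time" < pvKey "utc_time" := by
    simp [pvKey, Prod.Lex.lt_iff, rank_time, rank_utc_time]
  have h12 : pvKey "utc_date" < pvKey "utc_time" := by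
    simp [pvKey, Prod.Lex.lt_iff, rank_utc_date, rank_utc_time]
  split_ifs <;> simp [List.pairwise_cons, h01, h02, h12]

-- the main characterisation, for an arbitrary duplicate-free key list S
theorem sorted2_eq_pref_append (S : List String) (hS : S.Nodup) :
    PySem.List.sorted2 S (fun k => PySem.Dict.getD pvRankDict k 3) (fun k => k) false
      = pvPref S ++
        PySem.List.sorted (S.filter (fun k => !((pvPref S).contains k))) (fun k => k) false := by
  rw [sorted2_eq_sorted_lex]
  have hkey : (fun x : String => (toLex (PySem.Dict.getD pvRankDict x 3, x) : Lex (Int × String)))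
      = pvKey := rfl
  rw [hkey]
  set F := S.filter (fun k => !((pvPref S).contains k)) with hF
  have hFsub : ∀ {x : String}, x ∈ F → x ∈ S ∧ x ∉ pvPref S := by
    intro x hx
    rw [hF, List.mem_filter] at hx
    simpa [List.contains_eq_mem] using hx
  have hFnodup : F.Nodup := hS.filter _
  have hsortF := PySem.List.sorted_perm F (fun k : String => k) false
  apply PySem.List.sorted_eq_of_perm_of_pairwise_lt
  · -- permutation: pvPref S ++ sorted F ~ S
    refine ((List.Perm.append_left (pvPref S) hsortF).trans ?_)
    have hperm : (pvPref S).Perm (S.filter (fun k => (pvPref S).contains k)) := by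
      rw [List.perm_ext_iff_of_nodup (pref_nodup S) (hS.filter _)]
      intro a
      simp only [List.mem_filter, List.contains_eq_mem, decide_eq_true_eq]
      exact ⟨fun h => ⟨mem_pref_sub h, h⟩, fun h => h.2⟩
    refine (hperm.append_right F).trans ?_
    rw [hF]
    exact List.filter_append_perm _ S
  · -- pairwise strict key order on pvPref S ++ sorted F
    rw [List.pairwise_append]
    refine ⟨pref_pairwise S, ?_, ?_⟩
    · -- inside sorted F: strings strictly increase (nodup), ranks are all 3
      have hle := PySem.List.sorted_pairwise F (fun k : String => k)
      have hnd : (PySem.List.sorted F (fun k : String => k) false).Nodup := hsortF.symm.nodup hFnodup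
      refine (hle.and hnd).imp_of_mem ?_
      intro a b ha hb hab
      have haF : a ∈ F := (PySem.List.mem_sorted F (fun k : String => k) false a).mp ha
      have hbF : b ∈ F := (PySem.List.mem_sorted F (fun k : String => k) false b).mp hb
      have ha3 := rank_three_of_filter (hFsub haF).1 (hFsub haF).2
      have hb3 := rank_three_of_filter (hFsub hbF).1 (hFsub hbF).2
      simp only [pvKey, Prod.Lex.lt_iff, ofLex_toLex]
      exact Or.inr ⟨by omega, lt_of_le_of_ne hab.1 hab.2⟩
    · intro a ha b hb
      have hbF : b ∈ F := (PySem.List.mem_sorted F (fun k : String => k) false b).mp hb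
      have hb3 : PySem.Dict.getD pvRankDict b 3 = 3 :=
        rank_three_of_filter (hFsub hbF).1 (hFsub hbF).2
      have ha2 := rank_le_two_of_mem_pref ha
      simp only [pvKey, Prod.Lex.lt_iff, ofLex_toLex]
      left
      omega

-- ===== VERDICT (by name: the statement is the Claim_ definition above) =====
theorem compute_fieldnames_all_spec : Claim_equal_compute_fieldnames_all := by
  intro records _
  show compute_fieldnames_all records = compute_fieldnames_all_alt records
  have hS : (records.foldl
      (fun s rec => PySem.Set.update s (PySem.Dict.keys (PySem.Dict.mk rec)))
      (PySem.Set.empty : PySem.Set String)).Nodup :=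
    nodup_foldl_update records PySem.Set.empty List.nodup_nil
  exact (sorted2_eq_pref_append _ hS).symm
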